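-- pv_equiv track=rewrite | github.com/PolarBear85/freecodecamp-projects | Python/Daily_Code_Challenge/251031-spookify.py | spookify
-- ===== SOURCE A (Python) =====
-- def spookify(boo):
--
--     replacements = str.maketrans({"_":"~","-":"~"})
--     answer = list(boo.translate(replacements))
--
--
--     upper_case = True
--
--
--     for index,letter in enumerate(answer):
--         if not letter.isalpha():
--             continue
--         if upper_case:
--             answer[index] = letter.upper()
--             upper_case = False
--         else:
--             answer[index] = letter.lower()
--             upper_case=True
--
--
--     return "".join(answer)
-- ===== SOURCE B (Python) =====
-- def spookify(boo):
--     translated = boo.translate(str.maketrans({"_": "~", "-": "~"}))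
--     cased = [c.upper() if i % 2 == 0 else c.lower()
--              for i, c in enumerate(filter(str.isalpha, translated))]
--     it = iter(cased)
--     return "".join(next(it) if c.isalpha() else c for c in translated)
-- ===== Notes on version B (the rewrite author's own statement) =====
-- stated objective: alternative
-- what changed: Replaces A's in-place list mutation with a running case toggle by a two-pass decomposition: the case of each letter is computed separately from its letter-index parity, then merged back into the translated string around the unchanged non-letters.
import Mathlib
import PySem

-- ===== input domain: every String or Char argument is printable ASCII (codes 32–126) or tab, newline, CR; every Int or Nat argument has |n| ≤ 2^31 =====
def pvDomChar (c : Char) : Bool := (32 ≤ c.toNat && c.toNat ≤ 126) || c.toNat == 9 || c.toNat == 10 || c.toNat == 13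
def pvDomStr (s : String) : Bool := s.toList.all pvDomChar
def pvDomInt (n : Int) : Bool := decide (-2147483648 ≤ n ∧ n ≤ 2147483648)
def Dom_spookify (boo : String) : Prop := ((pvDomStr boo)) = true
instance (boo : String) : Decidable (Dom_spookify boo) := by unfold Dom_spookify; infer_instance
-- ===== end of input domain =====

-- B alternates letter case by letter-index parity in a separate pass instead of A's running toggle; same cost, different decomposition.

-- boo.translate(str.maketrans({"_":"~","-":"~"})), per character (both Pythons do this translate)
def trChar (c : Char) : Char := if c = '_' || c = '-' then '~' else c

-- ===== PORT A =====
-- the for-loop over enumerate(answer) with the upper_case toggle, mutating answer in place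
def spookifyLoop : List Char → Bool → List Char
  | [], _ => []
  | c :: rest, up =>
    if PySem.Chars.isalpha c = false then c :: spookifyLoop rest up
    else if up then PySem.Chars.upperChar c :: spookifyLoop rest false
    else PySem.Chars.lowerChar c :: spookifyLoop rest true

def spookify (boo : String) : String :=
  String.mk (spookifyLoop (boo.toList.map trChar) true)

-- ===== PORT B =====
-- the joining generator: emit next(cased) for alphabetic characters, the character itself otherwise
-- ([] in the alpha case is unreachable: cased holds one entry per alphabetic character)
def emitCased : List Char → List Char → List Char
  | [], _ => []
  | c :: rest, cs =>
    if PySem.Chars.isalpha c then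
      match cs with
      | d :: ds => d :: emitCased rest ds
      | [] => emitCased rest []
    else c :: emitCased rest cs

def spookify_alt (boo : String) : String :=
  let translated := boo.toList.map trChar
  let cased := (PySem.List.enumerate (translated.filter PySem.Chars.isalpha) 0).map
      (fun p => if PySem.Int.mod p.1 2 == 0 then PySem.Chars.upperChar p.2 else PySem.Chars.lowerChar p.2)
  String.mk (emitCased translated cased)

-- ===== PRECONDITION & SPEC =====
def Spec_spookify (boo : String) (out : String) : Prop := out = spookify_alt boo
instance (boo : String) (out : String) : Decidable (Spec_spookify boo out) := by unfold Spec_spookify; infer_instance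

-- ===== CLAIM (what is proved, stated in full; the proofs are below) =====
def Claim_equal_spookify : Prop := ∀ (boo : String), Dom_spookify boo → Spec_spookify boo (spookify boo)

-- ===== LEMMAS AND PROOFS =====

lemma mod2_succ (n : Int) :
    (PySem.Int.mod (n + 1) 2 == 0) = !(PySem.Int.mod n 2 == 0) := by
  rw [PySem.Int.mod_eq_emod_of_pos (by omega), PySem.Int.mod_eq_emod_of_pos (by omega)]
  rcases Int.emod_two_eq_zero_or_one n with h | h
  · have h1 : (n + 1) % 2 = 1 := by omega
    simp [h, h1]
  · have h1 : (n + 1) % 2 = 0 := by omega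
    simp [h, h1]

lemma loop_eq_emit (l : List Char) (n : Int) :
    spookifyLoop l (PySem.Int.mod n 2 == 0) =
      emitCased l ((PySem.List.enumerate (l.filter PySem.Chars.isalpha) n).map
        (fun p => if PySem.Int.mod p.1 2 == 0 then PySem.Chars.upperChar p.2
                  else PySem.Chars.lowerChar p.2)) := by
  induction l generalizing n with
  | nil => rfl
  | cons c rest ih =>
    cases h : PySem.Chars.isalpha c with
    | false =>
      rw [List.filter_cons_of_neg (by simp [h])]
      calc spookifyLoop (c :: rest) (PySem.Int.mod n 2 == 0)
          = c :: spookifyLoop rest (PySem.Int.mod n 2 == 0) := by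
            simp [spookifyLoop, h]
        _ = c :: emitCased rest _ := by rw [ih n]
        _ = emitCased (c :: rest) _ := by simp [emitCased, h]
    | true =>
      rw [List.filter_cons_of_pos (by simp [h]), PySem.List.enumerate_cons, List.map_cons]
      have e1 : spookifyLoop (c :: rest) (PySem.Int.mod n 2 == 0) =
          (if (PySem.Int.mod n 2 == 0) then PySem.Chars.upperChar c :: spookifyLoop rest false
           else PySem.Chars.lowerChar c :: spookifyLoop rest true) := by
        simp [spookifyLoop, h]
      have e2 : ∀ (d : Char) (ds : List Char),
          emitCased (c :: rest) (d :: ds) = d :: emitCased rest ds := fun d ds => by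
        simp [emitCased, h]
      rw [e1, e2]
      have ht := ih (n + 1)
      rw [mod2_succ] at ht
      cases hm : (PySem.Int.mod n 2 == 0)
      · rw [hm] at ht
        simp only [Bool.not_false] at ht
        simp only [Bool.false_eq_true, if_false, ht]
      · rw [hm] at ht
        simp only [Bool.not_true] at ht
        simp only [if_true, ht]

-- ===== VERDICT (by name: the statement is the Claim_ definition above) =====
theorem spookify_spec : Claim_equal_spookify := by
  intro boo _
  show spookify boo = spookify_alt boo
  unfold spookify spookify_alt
  have h := loop_eq_emit (boo.toList.map trChar) 0
  rw [show (PySem.Int.mod 0 2 == 0) = true from by decide] at h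
  exact congrArg String.mk h
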